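-- pv_equiv track=rewrite | github.com/emiliebutez/Projet_TicTacToe | Tic_Tac_Toe.py | compterDiagonales
-- ===== SOURCE A (Python) =====
-- size = 4
--
-- def compterDiagonales(grille, symbole) :
--     """Compte le nombre de fois où le symbole est sur
--     une diagonale qui peut gagner"""
--     diagA = 0
--     diagB = 0
--     for d in range(size) :
--         if grille[d][d] == symbole :
--             diagA += 1
--         elif grille[d][d] == -symbole :
--             diagA = 0
--
--         if grille[d][size - d - 1] == symbole :
--             diagB += 1
--         elif grille[d][size - d - 1] == -symbole :
--             diagB = 0
--
--
--     return max(diagA, diagB)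
-- ===== SOURCE B (Python) =====
-- size = 4
--
-- def _score(diag, symbole):
--     """A diagonal scores the number of `symbole` cells after its last opponent cell."""
--     start = 0
--     for i, c in enumerate(diag):
--         if c == -symbole:
--             start = i + 1
--     return diag[start:].count(symbole)
--
-- def compterDiagonales(grille, symbole):
--     diagA = [grille[d][d] for d in range(size)]
--     diagB = [grille[d][size - 1 - d] for d in range(size)]
--     return max(_score(diagA, symbole), _score(diagB, symbole))
-- ===== Notes on version B (the rewrite author's own statement) =====
-- stated objective: alternative
-- what changed: Replaces A's single interleaved loop that accumulates both diagonal counters with reset-on-opponent by building each diagonal as an explicit list and scoring it in two phases (locate the last opponent cell, then count the symbol in the suffix after it); Pre_ excludes symbole == 0, the degenerate empty-cell marker on which symbole == -symbole makes A's reset branch dead code and either reading of the corner is defensible.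
-- outside the precondition, e.g. on compterDiagonales([[0, 0, 0, 0], [0, 0, 0, 0], [0, 0, 0, 0], [0, 0, 0, 0]], 0): A returns 4, B returns 0
import Mathlib
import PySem

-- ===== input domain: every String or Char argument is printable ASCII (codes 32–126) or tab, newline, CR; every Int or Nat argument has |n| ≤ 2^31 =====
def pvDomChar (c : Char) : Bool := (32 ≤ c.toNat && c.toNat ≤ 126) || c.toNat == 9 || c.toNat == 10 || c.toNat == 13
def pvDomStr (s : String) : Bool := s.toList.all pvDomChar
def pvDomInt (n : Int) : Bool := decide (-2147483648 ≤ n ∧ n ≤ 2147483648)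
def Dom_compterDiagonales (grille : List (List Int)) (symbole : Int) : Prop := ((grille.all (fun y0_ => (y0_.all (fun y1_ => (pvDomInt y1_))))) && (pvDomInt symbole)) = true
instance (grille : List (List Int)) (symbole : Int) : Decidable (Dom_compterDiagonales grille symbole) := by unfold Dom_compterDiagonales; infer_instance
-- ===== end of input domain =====

-- ===== PORT A =====

-- B replaces A's interleaved accumulate-with-reset loop by building each diagonal as a list and
-- scoring it in two phases (locate the last opponent cell, count the symbol in the suffix); same cost.

-- ===== PORT A =====
def compterDiagonales (grille : List (List Int)) (symbole : Int) : Int :=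
  let p := (PySem.List.pyRange 0 4 1).foldl
    (fun (st : Int × Int) (d : Int) =>
      let cA := PySem.List.pyGetD (PySem.List.pyGetD grille d []) d 0
      let diagA := if cA = symbole then st.1 + 1 else if cA = -symbole then 0 else st.1
      let cB := PySem.List.pyGetD (PySem.List.pyGetD grille d []) (4 - d - 1) 0
      let diagB := if cB = symbole then st.2 + 1 else if cB = -symbole then 0 else st.2
      (diagA, diagB)) (0, 0)
  max p.1 p.2

-- ===== PORT B =====
def pvScore (diag : List Int) (symbole : Int) : Int :=
  let start := (PySem.List.enumerate diag).foldl
    (fun (st : Int) (p : Int × Int) =>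
      if p.2 = -symbole then p.1 + 1 else st) 0
  PySem.List.count (PySem.List.slice diag (some start) none) symbole

def compterDiagonales_alt (grille : List (List Int)) (symbole : Int) : Int :=
  let diagA := (PySem.List.pyRange 0 4 1).map
    (fun d => PySem.List.pyGetD (PySem.List.pyGetD grille d []) d 0)
  let diagB := (PySem.List.pyRange 0 4 1).map
    (fun d => PySem.List.pyGetD (PySem.List.pyGetD grille d []) (4 - 1 - d) 0)
  max (pvScore diagA symbole) (pvScore diagB symbole)

-- ===== PRECONDITION & SPEC =====
-- Pre_: the grid shape A indexes (rows 0..3, in row d columns d and 3-d), and symbole ≠ 0: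
-- for symbole == 0 (the empty-cell marker, never a player's symbol) symbole == -symbole, so A's
-- reset branch is dead and A counts empty cells, while B treats them as blockers — both corner
-- readings are defensible and neither is specified, so that degenerate input is excluded.
def Pre_compterDiagonales (grille : List (List Int)) (symbole : Int) : Prop :=
  symbole ≠ 0 ∧
  4 ≤ grille.length ∧
  4 ≤ (grille.getD 0 []).length ∧ 3 ≤ (grille.getD 1 []).length ∧
  3 ≤ (grille.getD 2 []).length ∧ 4 ≤ (grille.getD 3 []).length

instance (grille : List (List Int)) (symbole : Int) : Decidable (Pre_compterDiagonales grille symbole) := by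
  unfold Pre_compterDiagonales; infer_instance

def pvWitness_compterDiagonales : List (List Int) × Int :=
  ([[1, 0, 0, -1], [0, 1, -1, 0], [0, -1, 1, 0], [-1, 0, 0, 1]], 1)

def Spec_compterDiagonales (grille : List (List Int)) (symbole : Int) (out : Int) : Prop := out = compterDiagonales_alt grille symbole
instance (grille : List (List Int)) (symbole : Int) (out : Int) : Decidable (Spec_compterDiagonales grille symbole out) := by unfold Spec_compterDiagonales; infer_instance

-- ===== CLAIM =====
def Claim_equal_compterDiagonales : Prop := ∀ (grille : List (List Int)) (symbole : Int), Dom_compterDiagonales grille symbole → Pre_compterDiagonales grille symbole → Spec_compterDiagonales grille symbole (compterDiagonales grille symbole)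

-- ===== LEMMAS AND PROOFS =====

-- One diagonal (symbole ≠ 0): A's accumulate-with-reset fold equals B's
-- locate-last-opponent-then-count-suffix score.
lemma score_eq (a b c d s : Int) (hs : s ≠ 0) :
    ([a, b, c, d] : List Int).foldl
      (fun x v => if v = s then x + 1 else if v = -s then 0 else x) 0
      = pvScore [a, b, c, d] s := by
  have hns : ∀ v : Int, v = s → v = -s → False := by intro v h1 h2; omega
  simp only [pvScore, PySem.List.enumerate, List.foldl]
  split_ifs <;> simp_all [PySem.List.slice, PySem.List.count]

-- ===== VERDICT =====
theorem compterDiagonales_spec : Claim_equal_compterDiagonales := by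
  intro grille symbole _ hpre
  obtain ⟨hs, h0, h1, h2, h3, h4⟩ := hpre
  rcases grille with _ | ⟨g0, grille⟩; · simp at h0
  rcases grille with _ | ⟨g1, grille⟩; · simp at h0
  rcases grille with _ | ⟨g2, grille⟩; · simp at h0
  rcases grille with _ | ⟨g3, grille⟩; · simp at h0
  simp only [List.getD_cons_zero, List.getD_cons_succ] at h1 h2 h3 h4
  rcases g0 with _ | ⟨a0, g0⟩; · simp at h1
  rcases g0 with _ | ⟨a1, g0⟩; · simp at h1
  rcases g0 with _ | ⟨a2, g0⟩; · simp at h1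
  rcases g0 with _ | ⟨a3, g0⟩; · simp at h1
  rcases g1 with _ | ⟨b0, g1⟩; · simp at h2
  rcases g1 with _ | ⟨b1, g1⟩; · simp at h2
  rcases g1 with _ | ⟨b2, g1⟩; · simp at h2
  rcases g2 with _ | ⟨c0, g2⟩; · simp at h3
  rcases g2 with _ | ⟨c1, g2⟩; · simp at h3
  rcases g2 with _ | ⟨c2, g2⟩; · simp at h3
  rcases g3 with _ | ⟨d0, g3⟩; · simp at h4
  rcases g3 with _ | ⟨d1, g3⟩; · simp at h4
  rcases g3 with _ | ⟨d2, g3⟩; · simp at h4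
  rcases g3 with _ | ⟨d3, g3⟩; · simp at h4
  have hr : PySem.List.pyRange 0 4 1 = [0, 1, 2, 3] := by decide
  unfold Spec_compterDiagonales compterDiagonales compterDiagonales_alt
  simp only [hr, List.foldl, List.map]
  norm_num [PySem.List.pyGetD_ofNat', List.getD]
  congr 1
  · rw [← score_eq a0 b1 c2 d3 symbole hs]; simp [List.foldl]
  · rw [← score_eq a3 b2 c1 d0 symbole hs]; simp [List.foldl]
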